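-- pv_equiv track=rewrite | github.com/sfc-gh-tracker/TechUp | Pipeline Factory/app.py | enforce_read_only
-- ===== SOURCE A (Python) =====
-- def enforce_read_only(sql_text: str) -> bool:
--     s = " " + (sql_text or "").upper() + " "
--     prohibited = [
--         " INSERT ", " UPDATE ", " DELETE ", " MERGE ", " TRUNCATE ",
--         " CREATE ", " ALTER ", " DROP ", " GRANT ", " REVOKE ",
--         " COPY ", " CALL ", " USE ", " SET "
--     ]
--     return not any(tok in s for tok in prohibited)
-- ===== SOURCE B (Python) =====
-- PROHIBITED = {
--     "INSERT", "UPDATE", "DELETE", "MERGE", "TRUNCATE",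
--     "CREATE", "ALTER", "DROP", "GRANT", "REVOKE",
--     "COPY", "CALL", "USE", "SET",
-- }
--
-- def enforce_read_only(sql_text: str) -> bool:
--     s = " " + (sql_text or "").upper() + " "
--     return not any(tok in PROHIBITED for tok in s.split(" "))
-- ===== Notes on version B (the rewrite author's own statement) =====
-- stated objective: idiomatic
-- what changed: B splits the padded uppercased SQL once on single spaces and tests each token against a set of bare keywords, instead of scanning the whole string once per space-padded keyword.
import Mathlib
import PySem

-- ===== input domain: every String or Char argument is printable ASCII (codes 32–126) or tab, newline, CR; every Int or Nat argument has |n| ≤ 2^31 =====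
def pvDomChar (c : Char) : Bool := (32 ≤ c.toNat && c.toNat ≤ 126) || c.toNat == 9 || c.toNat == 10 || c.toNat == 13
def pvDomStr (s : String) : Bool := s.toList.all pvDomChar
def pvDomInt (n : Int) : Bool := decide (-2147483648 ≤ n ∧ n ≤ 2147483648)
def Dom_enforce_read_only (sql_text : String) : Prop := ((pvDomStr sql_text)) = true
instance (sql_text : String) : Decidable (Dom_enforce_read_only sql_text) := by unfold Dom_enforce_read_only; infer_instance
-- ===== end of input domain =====

-- B tokenizes the padded uppercased SQL once with split(' ') and tests tokens against a keyword set,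
-- instead of scanning the whole string once per space-padded keyword (objective: idiomatic).

-- ===== PORT A =====
-- s = " " + (sql_text or "").upper() + " "   ((sql_text or "") = sql_text for strings: "" stays "")
def enforce_read_only (sql_text : String) : Bool :=
  let s : List Char := (' ' :: PySem.Chars.upper sql_text.toList) ++ [' ']
  let prohibited : List (List Char) :=
    [" INSERT ".toList, " UPDATE ".toList, " DELETE ".toList, " MERGE ".toList, " TRUNCATE ".toList,
     " CREATE ".toList, " ALTER ".toList, " DROP ".toList, " GRANT ".toList, " REVOKE ".toList,
     " COPY ".toList, " CALL ".toList, " USE ".toList, " SET ".toList]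
  !(prohibited.any fun tok => PySem.Chars.isIn tok s)

-- ===== PORT B =====
def pvProhibited : PySem.Set (List Char) :=
  PySem.Set.ofList
    ["INSERT".toList, "UPDATE".toList, "DELETE".toList, "MERGE".toList, "TRUNCATE".toList,
     "CREATE".toList, "ALTER".toList, "DROP".toList, "GRANT".toList, "REVOKE".toList,
     "COPY".toList, "CALL".toList, "USE".toList, "SET".toList]

def enforce_read_only_alt (sql_text : String) : Bool :=
  let s : List Char := (' ' :: PySem.Chars.upper sql_text.toList) ++ [' ']
  !((PySem.Chars.splitOn s [' ']).any fun tok => PySem.Set.contains pvProhibited tok)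

-- ===== PRECONDITION & SPEC =====
def Spec_enforce_read_only (sql_text : String) (out : Bool) : Prop := out = enforce_read_only_alt sql_text
instance (sql_text : String) (out : Bool) : Decidable (Spec_enforce_read_only sql_text out) := by unfold Spec_enforce_read_only; infer_instance

-- ===== CLAIM (what is proved, stated in full; the proofs are below) =====
def Claim_equal_enforce_read_only : Prop := ∀ (sql_text : String), Dom_enforce_read_only sql_text → Spec_enforce_read_only sql_text (enforce_read_only sql_text)

-- ===== LEMMAS AND PROOFS =====

-- clean recursion computing Python's s.split(' ') on List Char
def tokens : List Char → List (List Char)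
  | [] => [[]]
  | c :: l => if c = ' ' then [] :: tokens l else (tokens l).modifyHead (c :: ·)

lemma go_eq (fuel : Nat) : ∀ (l : List Char), l.length ≤ fuel → ∀ cur acc,
    PySem.Chars.splitOn.go [' '] fuel l cur acc = acc.reverse ++ (tokens l).modifyHead (cur.reverse ++ ·) := by
  induction fuel with
  | zero =>
    intro l hl cur acc
    have : l = [] := List.eq_nil_of_length_eq_zero (Nat.le_zero.mp hl)
    subst this
    simp [PySem.Chars.splitOn.go, tokens]
  | succ f ih =>
    intro l hl cur acc
    cases l with
    | nil => simp [PySem.Chars.splitOn.go, tokens]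
    | cons c rest =>
      by_cases hc : c = ' '
      · subst hc
        rw [show PySem.Chars.splitOn.go [' '] (f+1) (' '::rest) cur acc
              = PySem.Chars.splitOn.go [' '] f rest [] (cur.reverse :: acc) by
            simp [PySem.Chars.splitOn.go, List.isPrefixOf]]
        rw [ih rest (by simpa using Nat.lt_succ_iff.mp (by simpa using hl)) [] (cur.reverse :: acc)]
        simp only [tokens, List.reverse_cons, List.reverse_nil, List.nil_append,
          List.append_assoc, List.cons_append]
        cases tokens rest <;> simp [List.modifyHead]
      · rw [show PySem.Chars.splitOn.go [' '] (f+1) (c::rest) cur acc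
              = PySem.Chars.splitOn.go [' '] f rest (c :: cur) acc by
            simp [PySem.Chars.splitOn.go, List.isPrefixOf, show ' ' ≠ c from fun h => hc h.symm]]
        rw [ih rest (by simpa using Nat.lt_succ_iff.mp (by simpa using hl)) (c :: cur) acc]
        simp [tokens, hc, List.modifyHead_modifyHead, Function.comp_def]

lemma tokens_ne_nil (l : List Char) : tokens l ≠ [] := by
  induction l with
  | nil => simp [tokens]
  | cons c rest ih =>
    by_cases hc : c = ' '
    · simp [tokens, hc]
    · rw [tokens, if_neg hc]
      obtain ⟨h, t, ht⟩ := List.exists_cons_of_ne_nil ih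
      simp [ht, List.modifyHead]

lemma splitOn_space (s : List Char) : PySem.Chars.splitOn s [' '] = tokens s := by
  have h := go_eq (s.length + 1) s (Nat.le_succ _) [] []
  obtain ⟨a, L, hL⟩ := List.exists_cons_of_ne_nil (tokens_ne_nil s)
  rw [PySem.Chars.splitOn, h, hL]
  simp [List.modifyHead]

lemma tokens_nospace (l : List Char) (h : ' ' ∉ l) : tokens l = [l] := by
  induction l with
  | nil => simp [tokens]
  | cons c rest ih =>
    have hc : c ≠ ' ' := fun e => h (e ▸ List.mem_cons_self)
    rw [tokens, if_neg hc, ih (fun m => h (List.mem_cons_of_mem _ m))]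
    simp [List.modifyHead]

lemma tokens_split (u l : List Char) : tokens (u ++ ' ' :: l) = tokens u ++ tokens l := by
  induction u with
  | nil => simp [tokens]
  | cons c u' ih =>
    by_cases hc : c = ' '
    · simp [tokens, hc, ih]
    · simp only [List.cons_append, tokens, if_neg hc, ih]
      obtain ⟨h, t, ht⟩ := List.exists_cons_of_ne_nil (tokens_ne_nil u')
      simp [ht, List.modifyHead]

lemma tokens_head (l : List Char) : ∀ h t, tokens l = h :: t →
    ∃ v, l = h ++ v ∧ (v = [] ∨ ∃ v₀, v = ' ' :: v₀) := by
  induction l with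
  | nil =>
    intro h t he
    rw [tokens] at he
    injection he with e1 _
    exact ⟨[], by simp [← e1], Or.inl rfl⟩
  | cons c rest ih =>
    intro h t he
    by_cases hc : c = ' '
    · rw [tokens, if_pos hc] at he
      injection he with e1 _
      exact ⟨' ' :: rest, by simp [← e1, hc], Or.inr ⟨rest, rfl⟩⟩
    · rw [tokens, if_neg hc] at he
      obtain ⟨h', t', ht⟩ := List.exists_cons_of_ne_nil (tokens_ne_nil rest)
      rw [ht, List.modifyHead] at he
      injection he with e1 _
      obtain ⟨v, hv, hcond⟩ := ih h' t' ht
      exact ⟨v, by rw [← e1, hv]; rfl, hcond⟩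

lemma mem_tokens_tail (l : List Char) : ∀ h t, tokens l = h :: t → ∀ K ∈ t,
    ∃ u v, l = u ++ [' '] ++ K ++ v ∧ (v = [] ∨ ∃ v₀, v = ' ' :: v₀) := by
  induction l with
  | nil =>
    intro h t he K hK
    rw [tokens] at he
    injection he with _ e2
    rw [← e2] at hK
    exact absurd hK (List.not_mem_nil)
  | cons c rest ih =>
    intro h t he K hK
    by_cases hc : c = ' '
    · rw [tokens, if_pos hc] at he
      injection he with _ e2
      rw [← e2] at hK
      obtain ⟨h', t', ht'⟩ := List.exists_cons_of_ne_nil (tokens_ne_nil rest)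
      rw [ht'] at hK
      rcases List.mem_cons.mp hK with rfl | hK
      · obtain ⟨v, hv, hcond⟩ := tokens_head rest K t' ht'
        exact ⟨[], v, by rw [hv, hc]; rfl, hcond⟩
      · obtain ⟨u, v, huv, hcond⟩ := ih h' t' ht' K hK
        exact ⟨' ' :: u, v, by rw [hc, huv]; rfl, hcond⟩
    · rw [tokens, if_neg hc] at he
      obtain ⟨h', t', ht'⟩ := List.exists_cons_of_ne_nil (tokens_ne_nil rest)
      rw [ht', List.modifyHead] at he
      injection he with _ e2
      rw [← e2] at hK
      obtain ⟨u, v, huv, hcond⟩ := ih h' t' ht' K hK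
      exact ⟨c :: u, v, by rw [huv]; rfl, hcond⟩

-- K nonempty and space-free: K is a token of ' '::t++[' '] iff " K " occurs in it
lemma token_iff_infix (K t : List Char) (hne : K ≠ []) (hsp : ' ' ∉ K) :
    K ∈ tokens ((' ' :: t) ++ [' ']) ↔ (' ' :: (K ++ [' '])) <:+: ((' ' :: t) ++ [' ']) := by
  set s : List Char := (' ' :: t) ++ [' '] with hs
  constructor
  · intro hmem
    obtain ⟨h, tl, hht⟩ := List.exists_cons_of_ne_nil (tokens_ne_nil s)
    rw [hht] at hmem
    rcases List.mem_cons.mp hmem with rfl | hK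
    · -- K is the first token: K is a prefix of s, but s starts with ' ' ∉ K
      obtain ⟨v, hv, _⟩ := tokens_head s K tl hht
      cases K with
      | nil => exact absurd rfl hne
      | cons k0 K' =>
        have hv' : ' ' = k0 ∧ t ++ [' '] = K' ++ v := by rw [hs] at hv; simpa using hv
        exact (hsp (by rw [← hv'.1]; exact List.mem_cons_self)).elim
    · obtain ⟨u, v, huv, hcond⟩ := mem_tokens_tail s h tl hht K hK
      rcases hcond with rfl | ⟨v₀, rfl⟩
      · -- v = []: then K would end s, but s ends with ' ' ∉ K
        exfalso
        have h1 : s.getLast? = some ' ' := by rw [hs]; exact List.getLast?_concat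
        have huv' : s = (u ++ [' ']) ++ K := by rw [huv]; simp
        rw [huv', List.getLast?_append_of_ne_nil _ hne] at h1
        exact hsp (List.mem_of_getLast? h1)
      · exact ⟨u, v₀, by rw [huv]; simp⟩
  · rintro ⟨u, v, huv⟩
    have : s = u ++ ' ' :: (K ++ ' ' :: v) := by rw [← huv]; simp
    rw [this, tokens_split, tokens_split, tokens_nospace K hsp]
    simp

lemma isIn_pad_iff (K t : List Char) (hne : K ≠ []) (hsp : ' ' ∉ K) :
    PySem.Chars.isIn (' ' :: (K ++ [' '])) ((' ' :: t) ++ [' ']) = true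
      ↔ K ∈ tokens ((' ' :: t) ++ [' ']) := by
  rw [PySem.Chars.isIn_iff_infix, token_iff_infix K t hne hsp]

def pad (K : List Char) : List Char := ' ' :: (K ++ [' '])

lemma any_pad_eq (KWs : List (List Char)) (hK : ∀ K ∈ KWs, K ≠ [] ∧ ' ' ∉ K) (t : List Char) :
    ((KWs.map pad).any fun tok => PySem.Chars.isIn tok ((' ' :: t) ++ [' '])) =
      ((tokens ((' ' :: t) ++ [' '])).any fun tok => KWs.contains tok) := by
  rw [Bool.eq_iff_iff]
  simp only [List.any_eq_true, List.mem_map, List.contains_iff_mem]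
  constructor
  · rintro ⟨p, ⟨K, hKmem, rfl⟩, hin⟩
    exact ⟨K, ((isIn_pad_iff K t (hK K hKmem).1 (hK K hKmem).2).mp hin), hKmem⟩
  · rintro ⟨K, hKtok, hKmem⟩
    exact ⟨pad K, ⟨K, hKmem, rfl⟩,
      (isIn_pad_iff K t (hK K hKmem).1 (hK K hKmem).2).mpr hKtok⟩

def pvKWs : List (List Char) :=
  ["INSERT".toList, "UPDATE".toList, "DELETE".toList, "MERGE".toList, "TRUNCATE".toList,
   "CREATE".toList, "ALTER".toList, "DROP".toList, "GRANT".toList, "REVOKE".toList,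
   "COPY".toList, "CALL".toList, "USE".toList, "SET".toList]

-- ===== VERDICT (by name: the statement is the Claim_ definition above) =====
theorem enforce_read_only_spec : Claim_equal_enforce_read_only := by
  intro sql_text _
  unfold Spec_enforce_read_only enforce_read_only enforce_read_only_alt
  have hA : ([" INSERT ".toList, " UPDATE ".toList, " DELETE ".toList, " MERGE ".toList,
      " TRUNCATE ".toList, " CREATE ".toList, " ALTER ".toList, " DROP ".toList,
      " GRANT ".toList, " REVOKE ".toList, " COPY ".toList, " CALL ".toList,
      " USE ".toList, " SET ".toList] : List (List Char)) = pvKWs.map pad := by decide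
  have hB : ∀ tok : List Char, PySem.Set.contains pvProhibited tok = pvKWs.contains tok := by
    intro tok
    have h : pvProhibited = pvKWs := by decide
    rw [h, PySem.Set.contains_eq_listContains]
  simp only [hA, splitOn_space, hB]
  rw [any_pad_eq pvKWs (by decide) (PySem.Chars.upper sql_text.toList)]
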